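-- pv_equiv track=rewrite | github.com/Luominai/midi-from-youtube | keyboard_parser2.py | has_pattern
-- ===== SOURCE A (Python) =====
-- import math
--
-- def has_pattern(full_survey):
--     """
--     Checks if the plateaus and valleys of the terrain are arranged in a keyboard pattern. Use to help check if a keyset is a keyboard
--     """
--
--     if (len(full_survey) < 12):
--         return False
--
--     # if all plateaus and no valleys, it is a valid pattern only if the plateaus are also evenly spaced
--     if all([not is_valley for (start, end, y_pos, is_valley, *rest) in full_survey]):
--         return is_uniform(full_survey)
--
--     keyboard = "101011010101" + "101011010101"
--     pattern = ""
--
--     for i in range(0, 12):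
--         (start, end, y_pos, is_valley, *rest) = full_survey[i]
--         if is_valley:
--             pattern += "0"
--         else:
--             pattern += "1"
--
--     index_of_pattern = keyboard.find(pattern)
--     if index_of_pattern == -1:
--         return False
--
--     for i in range(12, len(full_survey)):
--         (start, end, y_pos, is_valley, *rest) = full_survey[i]
--         expected = "0" if is_valley else "1"
--         if keyboard[(index_of_pattern + i) % len(keyboard)] != expected:
--             return False
--
--     return True
--
-- def is_uniform(terrain, buffer = 1, scale_thresh = 1.5, pixel_thresh = 8):
--     """
--     Checks if all terrain is siilar in width
--     """
--     shortest = math.inf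
--     longest = 0.0
--
--     # # we don't know the full extent of the first and last runs, so we exclude them from consideration
--     for i in range(buffer, len(terrain) - buffer):
--         (start, end, *rest) = terrain[i]
--         dist = end - start
--
--         if dist > longest:
--             longest = dist
--
--         if dist < shortest:
--             shortest = dist
--
--     if (longest / shortest) >= scale_thresh and (longest - shortest) > pixel_thresh:
--         return False
--
--     return True
-- ===== SOURCE B (Python) =====
-- BASE = "101011010101"
--
--
-- def has_pattern(full_survey):
--     if len(full_survey) < 12:
--         return False
--     flags = [row[3] for row in full_survey]
--     if not any(flags):
--         # all plateaus: valid only if the interior runs are all of similar width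
--         widths = [row[1] - row[0] for row in full_survey[1:-1]]
--         longest, shortest = max(widths), min(widths)
--         return not (2 * longest >= 3 * shortest and longest - shortest > 8)
--     # try every phase of the 12-periodic keyboard pattern
--     return any(all((BASE[(r + i) % 12] == "0") == flag for i, flag in enumerate(flags))
--                for r in range(12))
-- ===== Notes on version B (the rewrite author's own statement) =====
-- stated objective: idiomatic
-- what changed: Instead of committing to the phase found for the first 12 entries via str.find on a doubled keyboard string and then verifying the rest element-by-element against that phase, B builds the 0/1 flag list once and checks in one comprehension whether ANY of the 12 phases of the period-12 base pattern matches the whole survey; the uniform-width branch uses min()/max() over a width list and an exact integer cross-multiplication instead of a hand-rolled min/max loop with float division. …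
import Mathlib
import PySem

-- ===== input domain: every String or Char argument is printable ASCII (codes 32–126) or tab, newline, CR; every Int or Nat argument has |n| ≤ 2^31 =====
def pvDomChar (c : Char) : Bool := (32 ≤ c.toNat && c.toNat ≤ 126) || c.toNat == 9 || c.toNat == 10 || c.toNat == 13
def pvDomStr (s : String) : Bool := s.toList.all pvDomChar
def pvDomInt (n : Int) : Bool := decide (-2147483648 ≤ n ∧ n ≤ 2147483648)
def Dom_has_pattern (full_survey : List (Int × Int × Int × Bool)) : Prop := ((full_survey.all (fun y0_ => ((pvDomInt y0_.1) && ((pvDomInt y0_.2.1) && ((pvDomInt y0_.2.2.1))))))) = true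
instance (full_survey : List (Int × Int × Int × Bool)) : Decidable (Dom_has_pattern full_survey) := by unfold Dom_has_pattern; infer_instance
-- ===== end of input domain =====

-- B replaces A's commit-to-the-first-found-phase (str.find on a doubled keyboard string, then an
-- element-by-element verification loop) by a single try-all-12-phases comprehension over the whole
-- flag list, and the uniform branch's hand-rolled min/max loop with float division by min()/max()
-- over a width list and an exact integer cross-multiplication test (objective: idiomatic; same O(n)).

-- ===== PORT A =====
def pvBase : List Char := ['1', '0', '1', '0', '1', '1', '0', '1', '0', '1', '0', '1']

def pvRow : Int × Int × Int × Bool := (0, 0, 0, false)  -- pyGetD default; every use is in range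

-- exact port of the float comparison `longest/shortest >= 1.5` for shortest ≠ 0 and
-- |longest|, |shortest| ≤ 2^33 (guaranteed by Dom_): the true ratio is at least 2^-34 away from
-- 1.5 whenever 2L ≠ 3S, while the rounding error of the double division is far smaller.
def pvRatioGE15 (L S : Int) : Bool :=
  if 0 < S then decide (3 * S ≤ 2 * L) else decide (2 * L ≤ 3 * S)

-- is_uniform(terrain) with its default arguments buffer=1, scale_thresh=1.5, pixel_thresh=8
-- inlined (A calls it with defaults only); none = ZeroDivisionError (shortest = 0).
def pvIsUniform (terrain : List (Int × Int × Int × Bool)) : Option Bool :=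
  let st := (PySem.List.pyRange 1 ((terrain.length : Int) - 1) 1).foldl
    (fun (st : Option Int × Int) i =>
      let row := PySem.List.pyGetD terrain i pvRow
      let dist := row.2.1 - row.1
      let longest := if st.2 < dist then dist else st.2
      let shortest : Option Int := match st.1 with
        | none => some dist                               -- dist < math.inf
        | some s => if dist < s then some dist else some s
      (shortest, longest)) ((none : Option Int), (0 : Int))
  match st.1 with
  | none => some true          -- shortest stayed math.inf: longest/inf = 0.0 < 1.5, return True
  | some s =>
    if s = 0 then none         -- ZeroDivisionError (excluded by Pre_)
    else some (!(pvRatioGE15 st.2 s && decide (8 < st.2 - s)))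

def has_pattern (full_survey : List (Int × Int × Int × Bool)) : Bool :=
  if full_survey.length < 12 then false
  else if full_survey.all (fun r => !r.2.2.2) then
    (pvIsUniform full_survey).getD false  -- none = ZeroDivisionError, excluded by Pre_
  else
    let keyboard : List Char := pvBase ++ pvBase
    let pattern : List Char := (PySem.List.pyRange 0 12 1).foldl
      (fun p i => p ++ [if (PySem.List.pyGetD full_survey i pvRow).2.2.2 then '0' else '1']) []
    let idx := PySem.Chars.find keyboard pattern
    if idx = -1 then false
    else (PySem.List.pyRange 12 (full_survey.length : Int) 1).foldl
      (fun ok i =>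
        if PySem.List.pyGetD keyboard (PySem.Int.mod (idx + i) (keyboard.length : Int)) ' '
             ≠ (if (PySem.List.pyGetD full_survey i pvRow).2.2.2 then '0' else '1') then false
        else ok) true

-- ===== PORT B =====
def has_pattern_alt (full_survey : List (Int × Int × Int × Bool)) : Bool :=
  if full_survey.length < 12 then false
  else
    let flags := full_survey.map (fun r => r.2.2.2)
    if !(flags.any (fun b => b)) then
      let widths := (PySem.List.slice full_survey (some 1) (some (-1))).map (fun r => r.2.1 - r.1)
      let longest : Int := (PySem.List.max? widths (fun x => x)).getD 0
      let shortest : Int := (PySem.List.min? widths (fun x => x)).getD 0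
      !(decide (3 * shortest ≤ 2 * longest) && decide (8 < longest - shortest))
    else
      (PySem.List.pyRange 0 12 1).any (fun r =>
        (PySem.List.enumerate flags 0).all (fun p =>
          ((PySem.List.pyGetD pvBase (PySem.Int.mod (r + p.1) 12) ' ') == '0') == p.2))

-- ===== PRECONDITION & SPEC =====
-- Pre_ restricts the all-plateau branch (the only one that measures widths) to well-formed terrain
-- whose interior runs have positive width end - start: at width 0 A raises ZeroDivisionError, and
-- a run with end < start is malformed input (A's longest = 0.0 initialisation and signed float
-- division give accidental values there).
def Pre_has_pattern (full_survey : List (Int × Int × Int × Bool)) : Prop :=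
  (12 ≤ full_survey.length ∧ (∀ r ∈ full_survey, r.2.2.2 = false)) →
    (∀ r ∈ full_survey.tail.dropLast, 0 < r.2.1 - r.1)
instance (full_survey : List (Int × Int × Int × Bool)) : Decidable (Pre_has_pattern full_survey) := by
  unfold Pre_has_pattern; infer_instance

def pvWitness_has_pattern : (List (Int × Int × Int × Bool)) := List.replicate 12 (0, 1, 0, false)

def Spec_has_pattern (full_survey : List (Int × Int × Int × Bool)) (out : Bool) : Prop :=
  out = has_pattern_alt full_survey
instance (full_survey : List (Int × Int × Int × Bool)) (out : Bool) : Decidable (Spec_has_pattern full_survey out) := by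
  unfold Spec_has_pattern; infer_instance

-- ===== CLAIM (what is proved, stated in full; the proofs are below) =====
def Claim_equal_has_pattern : Prop := ∀ (full_survey : List (Int × Int × Int × Bool)), Dom_has_pattern full_survey → Pre_has_pattern full_survey → Spec_has_pattern full_survey (has_pattern full_survey)

-- ===== LEMMAS AND PROOFS =====

def pvW (r : Int × Int × Int × Bool) : Int := r.2.1 - r.1

theorem pvSlice11 {α : Type} (xs : List α) : PySem.List.slice xs (some 1) (some (-1)) = xs.tail.dropLast := by
  unfold PySem.List.slice
  simp [PySem.List.clampIdx]
  rcases xs with _ | ⟨x, t⟩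
  · simp
  · simp [List.dropLast_eq_take]

theorem pvFoldMM (t : List (Int × Int × Int × Bool)) : ∀ s L : Int,
    t.foldl (fun (st : Option Int × Int) row =>
      ((match st.1 with
        | none => some (row.2.1 - row.1)
        | some s => if row.2.1 - row.1 < s then some (row.2.1 - row.1) else some s),
       if st.2 < row.2.1 - row.1 then row.2.1 - row.1 else st.2)) (some s, L)
    = (some (t.foldl (fun a r => min a (pvW r)) s), t.foldl (fun a r => max a (pvW r)) L) := by
  induction t with
  | nil => intro s L; rfl
  | cons x t ih =>
    intro s L
    simp only [List.foldl_cons]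
    have hstep : ((if x.2.1 - x.1 < s then some (x.2.1 - x.1) else some s,
        if L < x.2.1 - x.1 then x.2.1 - x.1 else L) : Option Int × Int)
        = (some (min s (pvW x)), max L (pvW x)) := by
      simp only [pvW, Prod.mk.injEq]
      refine ⟨by split_ifs <;> simp <;> omega, by split_ifs <;> omega⟩
    rw [hstep, ih]

theorem pvFoldMinPos (t : List (Int × Int × Int × Bool)) : ∀ a : Int, 0 < a →
    (∀ r ∈ t, 0 < pvW r) → 0 < t.foldl (fun a r => min a (pvW r)) a := by
  induction t with
  | nil => intro a ha _; exact ha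
  | cons x t ih =>
    intro a ha h
    simp only [List.foldl_cons]
    exact ih _ (by have := h x List.mem_cons_self; omega) (fun r hr => h r (List.mem_cons_of_mem _ hr))

theorem pvFoldMaxGe (t : List (Int × Int × Int × Bool)) : ∀ a : Int,
    a ≤ t.foldl (fun a r => max a (pvW r)) a := by
  induction t with
  | nil => intro a; exact le_refl a
  | cons x t ih =>
    intro a
    simp only [List.foldl_cons]
    exact le_trans (le_max_left a (pvW x)) (ih _)

theorem pvMaxZero (t : List (Int × Int × Int × Bool)) : ∀ a : Int,
    t.foldl (fun a r => max a (pvW r)) (max 0 a) = max 0 (t.foldl (fun a r => max a (pvW r)) a) := by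
  induction t with
  | nil => intro a; rfl
  | cons x t ih =>
    intro a
    simp only [List.foldl_cons]
    have h : max (max 0 a) (pvW x) = max 0 (max a (pvW x)) := by omega
    rw [h, ih]

-- uniform branch: A's is_uniform equals B's uniform expression, given len ≥ 12 and all interior
-- widths positive
theorem pvUniform_eq (fs : List (Int × Int × Int × Bool)) (h12 : 12 ≤ fs.length)
    (hpos : ∀ r ∈ fs.tail.dropLast, 0 < r.2.1 - r.1) :
    (pvIsUniform fs).getD false =
      (let widths := (PySem.List.slice fs (some 1) (some (-1))).map (fun r => r.2.1 - r.1)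
       let longest : Int := (PySem.List.max? widths (fun x => x)).getD 0
       let shortest : Int := (PySem.List.min? widths (fun x => x)).getD 0
       !(decide (3 * shortest ≤ 2 * longest) && decide (8 < longest - shortest))) := by
  have hne : fs ≠ [] := by intro h; rw [h] at h12; simp at h12
  have hb : ((fs.length : Int) - 1) = ((fs.dropLast.length : Int)) := by
    rw [List.length_dropLast]; omega
  unfold pvIsUniform
  simp only [hb]
  rw [PySem.List.foldl_congr_mem _ _
      (fun (st : Option Int × Int) i =>
        let row := PySem.List.pyGetD fs.dropLast i pvRow
        let dist := row.2.1 - row.1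
        let longest := if st.2 < dist then dist else st.2
        let shortest : Option Int := match st.1 with
          | none => some dist
          | some s => if dist < s then some dist else some s
        (shortest, longest)) _
      (by
        intro acc i hi
        rw [PySem.List.mem_pyRange_one] at hi
        have h1 : 0 ≤ i := by omega
        have h2 : i < (fs.dropLast.length : Int) := hi.2
        have := PySem.List.pyGetD_eq_getElem (xs := fs) (i := i) (d := pvRow) h1 (by rw [List.length_dropLast] at h2; omega)
        have h4 := PySem.List.pyGetD_eq_getElem (xs := fs.dropLast) (i := i) (d := pvRow) h1 (by exact_mod_cast h2)
        simp only [this, h4, List.getElem_dropLast])]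
  rw [show (fun (st : Option Int × Int) i =>
        let row := PySem.List.pyGetD fs.dropLast i pvRow
        let dist := row.2.1 - row.1
        let longest := if st.2 < dist then dist else st.2
        let shortest : Option Int := match st.1 with
          | none => some dist
          | some s => if dist < s then some dist else some s
        (shortest, longest))
      = (fun (acc : Option Int × Int) (j : Int) =>
          (fun (st : Option Int × Int) (row : Int × Int × Int × Bool) =>
            ((match st.1 with
              | none => some (row.2.1 - row.1)
              | some s => if row.2.1 - row.1 < s then some (row.2.1 - row.1) else some s),
             if st.2 < row.2.1 - row.1 then row.2.1 - row.1 else st.2)) acc (PySem.List.pyGetD fs.dropLast j pvRow)) from rfl]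
  rw [PySem.List.foldl_pyRange_pyGetD' fs.dropLast pvRow
      (fun (st : Option Int × Int) (row : Int × Int × Int × Bool) =>
            ((match st.1 with
              | none => some (row.2.1 - row.1)
              | some s => if row.2.1 - row.1 < s then some (row.2.1 - row.1) else some s),
             if st.2 < row.2.1 - row.1 then row.2.1 - row.1 else st.2))
      ((none : Option Int), (0:Int)) (by norm_num : (0:Int) ≤ 1)]
  have hdrop : fs.dropLast.drop (1:Int).toNat = fs.tail.dropLast := by
    rw [show ((1:Int).toNat) = 1 from rfl, List.drop_one, List.tail_dropLast]
  rw [hdrop, pvSlice11]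
  rcases hmid : fs.tail.dropLast with _ | ⟨x, t⟩
  · exfalso
    have hlen : fs.tail.dropLast.length = fs.length - 2 := by
      rw [List.length_dropLast, List.length_tail]; omega
    rw [hmid] at hlen; simp at hlen; omega
  · have hxpos : 0 < pvW x := by
      have := hpos x (by rw [hmid]; exact List.mem_cons_self); simpa [pvW] using this
    have htpos : ∀ r ∈ t, 0 < pvW r := by
      intro r hr
      have := hpos r (by rw [hmid]; exact List.mem_cons_of_mem _ hr); simpa [pvW] using this
    simp only [List.foldl_cons]
    rw [show ((some (x.2.1 - x.1), if 0 < x.2.1 - x.1 then x.2.1 - x.1 else 0) : Option Int × Int)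
        = ((some (pvW x), max 0 (pvW x)) : Option Int × Int) from by
      simp only [pvW, Prod.mk.injEq]; refine ⟨by simp, by split_ifs <;> omega⟩]
    rw [pvFoldMM t (pvW x) (max 0 (pvW x)), pvMaxZero]
    have hSpos : 0 < t.foldl (fun a r => min a (pvW r)) (pvW x) :=
      pvFoldMinPos t (pvW x) hxpos htpos
    have hLpos : 0 < t.foldl (fun a r => max a (pvW r)) (pvW x) :=
      lt_of_lt_of_le hxpos (pvFoldMaxGe t (pvW x))
    have hmax0 : max 0 (t.foldl (fun a r => max a (pvW r)) (pvW x))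
        = t.foldl (fun a r => max a (pvW r)) (pvW x) := by omega
    rw [hmax0]
    simp only [pvW] at hSpos hLpos ⊢
    rw [if_neg (by omega : ¬ t.foldl (fun a r => min a (r.2.1 - r.1)) (x.2.1 - x.1) = 0)]
    rw [List.map_cons, PySem.List.min?_id_cons, PySem.List.max?_id_cons]
    simp only [Option.getD_some, List.foldl_map]
    simp [pvRatioGE15, hSpos]
    rfl

def pvFl (fs : List (Int × Int × Int × Bool)) (i : Nat) : Bool := (fs.getD i pvRow).2.2.2
def pvCh (b : Bool) : Char := if b then '0' else '1'
def pvP (fs : List (Int × Int × Int × Bool)) (r : Nat) : Prop :=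
  ∀ i, i < fs.length → pvBase.getD ((r + i) % 12) ' ' = pvCh (pvFl fs i)

theorem pvKbd : ∀ j, j < 24 → (pvBase ++ pvBase).getD j ' ' = pvBase.getD (j % 12) ' ' := by decide

theorem pvCore : ∀ a, a < 12 → ∀ b, b < 12 →
    (∀ j, j < 12 → pvBase.getD ((a + j) % 12) ' ' = pvBase.getD ((b + j) % 12) ' ') → a = b := by decide

theorem pvBase01 : ∀ m, m < 12 → pvBase.getD m ' ' = '0' ∨ pvBase.getD m ' ' = '1' := by decide

theorem pvChEq (c : Char) (hc : c = '0' ∨ c = '1') (b : Bool) :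
    (((c == '0') == b) = true) ↔ c = pvCh b := by
  rcases hc with rfl | rfl <;> cases b <;> simp [pvCh]

theorem pvFoldStop {c : Int → Prop} [inst : DecidablePred c] : ∀ (L : List Int) (b : Bool),
    L.foldl (fun ok i => if c i then false else ok) b = (b && decide (∀ i ∈ L, ¬ c i)) := by
  intro L
  induction L with
  | nil => intro b; simp
  | cons x t ih =>
    intro b
    simp only [List.foldl_cons]
    by_cases hx : c x
    · rw [if_pos hx, ih]
      simp [hx]
    · rw [if_neg hx, ih]
      simp [hx]

theorem pvPattern_eq (fs : List (Int × Int × Int × Bool)) :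
    (PySem.List.pyRange 0 12 1).foldl
      (fun p i => p ++ [if (PySem.List.pyGetD fs i pvRow).2.2.2 then '0' else '1']) []
    = (List.range 12).map (fun k => pvCh (pvFl fs k)) := by
  rw [PySem.List.foldl_append_singleton_eq_map, PySem.List.pyRange_one, List.map_map]
  simp [pvCh, pvFl]

theorem pvKlen : (pvBase ++ pvBase).length = 24 := by decide

theorem pvPatLen (fs : List (Int × Int × Int × Bool)) :
    ((List.range 12).map (fun k => pvCh (pvFl fs k))).length = 12 := by simp

theorem pvPrefix_iff (fs : List (Int × Int × Int × Bool)) (p : Nat) (hp : p ≤ 12) :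
    ((List.range 12).map (fun k => pvCh (pvFl fs k)) <+: (pvBase ++ pvBase).drop p)
    ↔ ∀ j, j < 12 → pvBase.getD ((p + j) % 12) ' ' = pvCh (pvFl fs j) := by
  rw [List.prefix_iff_eq_take, pvPatLen]
  have hdl : ((pvBase ++ pvBase).drop p).length = 24 - p := by rw [List.length_drop, pvKlen]
  have helem : ∀ j (hj : j < 12),
      ((pvBase ++ pvBase).drop p)[j]'(by omega) = pvBase.getD ((p + j) % 12) ' ' := by
    intro j hj
    rw [List.getElem_drop]
    have hpj : p + j < 24 := by omega
    rw [← List.getD_eq_getElem (pvBase ++ pvBase) ' ' (by rw [pvKlen]; omega)]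
    exact pvKbd _ hpj
  constructor
  · intro h j hj
    have hj' : j < ((List.range 12).map (fun k => pvCh (pvFl fs k))).length := by simp [hj]
    have e := List.getElem_of_eq h hj'
    rw [List.getElem_map, List.getElem_range, List.getElem_take, helem j hj] at e
    exact e.symm
  · intro h
    apply List.ext_getElem
    · simp [hdl]; omega
    · intro j hj1 hj2
      have hj : j < 12 := by simpa using hj1
      rw [List.getElem_map, List.getElem_range, List.getElem_take, helem j hj, h j hj]

theorem pvFlagGet (fs : List (Int × Int × Int × Bool)) (i : Nat) (hi : i < fs.length) :
    PySem.List.pyGetD (fs.map (fun x => x.2.2.2)) (i : Int) false = pvFl fs i := by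
  rw [PySem.List.pyGetD_natCast, pvFl]
  simp [List.getD, List.getElem?_map, List.getElem?_eq_getElem hi]

theorem pvB3_iff (fs : List (Int × Int × Int × Bool)) :
    ((PySem.List.pyRange 0 12 1).any (fun r =>
        (PySem.List.enumerate (fs.map (fun r => r.2.2.2)) 0).all (fun p =>
          ((PySem.List.pyGetD pvBase (PySem.Int.mod (r + p.1) 12) ' ') == '0') == p.2)) = true)
    ↔ ∃ r, r < 12 ∧ pvP fs r := by
  rw [List.any_eq_true]
  have inner : ∀ (r : Int), 0 ≤ r → r < 12 →
      ((PySem.List.enumerate (fs.map (fun x => x.2.2.2)) 0).all (fun p =>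
          ((PySem.List.pyGetD pvBase (PySem.Int.mod (r + p.1) 12) ' ') == '0') == p.2) = true
        ↔ pvP fs r.toNat) := by
    intro r hr0 hr12
    rw [PySem.List.enumerate_eq_map_pyRange _ false, List.all_map, List.all_eq_true]
    constructor
    · intro h i hi
      have hmem : (i : Int) ∈ PySem.List.pyRange 0 (PySem.List.len (fs.map (fun x => x.2.2.2))) := by
        rw [PySem.List.mem_pyRange_one, PySem.List.len_eq]
        simp
        omega
      have hx := h _ hmem
      simp only [Function.comp_apply] at hx
      have hmod : PySem.Int.mod (r + (i : Int)) 12 = (((r.toNat + i) % 12 : Nat) : Int) := by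
        rw [PySem.Int.mod_eq_emod_of_pos (by norm_num)]
        push_cast
        omega
      rw [hmod, PySem.List.pyGetD_natCast, pvFlagGet fs i hi] at hx
      exact (pvChEq _ (pvBase01 _ (Nat.mod_lt _ (by norm_num))) _).mp hx
    · intro h x hx
      rw [PySem.List.mem_pyRange_one, PySem.List.len_eq] at hx
      simp only [List.length_map] at hx
      simp only [Function.comp_apply]
      have hxi : x = ((x.toNat : Nat) : Int) := by omega
      have hilt : x.toNat < fs.length := by omega
      rw [hxi]
      have hmod : PySem.Int.mod (r + (x.toNat : Int)) 12 = (((r.toNat + x.toNat) % 12 : Nat) : Int) := by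
        rw [PySem.Int.mod_eq_emod_of_pos (by norm_num)]
        push_cast
        omega
      rw [hmod, PySem.List.pyGetD_natCast, pvFlagGet fs x.toNat hilt]
      exact (pvChEq _ (pvBase01 _ (Nat.mod_lt _ (by norm_num))) _).mpr (h x.toNat hilt)
  constructor
  · rintro ⟨r, hrmem, hr⟩
    rw [PySem.List.mem_pyRange_one] at hrmem
    exact ⟨r.toNat, by omega, (inner r hrmem.1 hrmem.2).mp hr⟩
  · rintro ⟨r, hr12, hP⟩
    refine ⟨(r : Int), by rw [PySem.List.mem_pyRange_one]; omega, ?_⟩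
    have := (inner (r : Int) (by omega) (by omega)).mpr
    simp only [Int.toNat_natCast] at this
    exact this hP

theorem pvA3_iff (fs : List (Int × Int × Int × Bool)) (hn : 12 ≤ fs.length) :
    ((if PySem.Chars.find (pvBase ++ pvBase) ((List.range 12).map (fun k => pvCh (pvFl fs k))) = -1
      then false
      else
        (PySem.List.pyRange 12 (fs.length : Int) 1).foldl
          (fun ok i =>
            if PySem.List.pyGetD (pvBase ++ pvBase)
                 (PySem.Int.mod
                   (PySem.Chars.find (pvBase ++ pvBase)
                      ((List.range 12).map (fun k => pvCh (pvFl fs k))) + i)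
                   ((pvBase ++ pvBase).length : Int)) ' '
               ≠ (if (PySem.List.pyGetD fs i pvRow).2.2.2 then '0' else '1') then false
            else ok) true) = true)
    ↔ ∃ r, r < 12 ∧ pvP fs r := by
  set pat := (List.range 12).map (fun k => pvCh (pvFl fs k)) with hpatdef
  set idx := PySem.Chars.find (pvBase ++ pvBase) pat with hidxdef
  by_cases hf : idx = -1
  · rw [if_pos hf]
    simp only [Bool.false_eq_true, false_iff]
    rintro ⟨r, hr, hP⟩
    have hpre : pat <+: (pvBase ++ pvBase).drop r :=
      (pvPrefix_iff fs r (by omega)).mpr (fun j hj => hP j (by omega))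
    have hinf : pat <:+: (pvBase ++ pvBase) :=
      hpre.isInfix.trans (List.drop_suffix r (pvBase ++ pvBase)).isInfix
    exact (PySem.Chars.find_ne_neg_one_iff _ _).mpr hinf hf
  · rw [if_neg hf]
    have h0 : 0 ≤ idx := by
      have h1 := PySem.Chars.neg_one_le_find (pvBase ++ pvBase) pat
      rw [← hidxdef] at h1
      omega
    obtain ⟨hprefix, -⟩ := PySem.Chars.find_spec (s := pvBase ++ pvBase) (sub := pat) (by rw [← hidxdef]; exact h0)
    rw [← hidxdef] at hprefix
    set p := idx.toNat with hpdef
    have hple : p ≤ 12 := by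
      have hlen := hprefix.length_le
      rw [pvPatLen, List.length_drop, pvKlen] at hlen
      omega
    have hpre12 := (pvPrefix_iff fs p hple).mp hprefix
    have hidxp : idx = (p : Int) := by omega
    have hcond : ∀ (i : Nat), i < fs.length →
        ((PySem.List.pyGetD (pvBase ++ pvBase)
            (PySem.Int.mod (idx + (i : Int)) ((pvBase ++ pvBase).length : Int)) ' '
          ≠ (if (PySem.List.pyGetD fs (i : Int) pvRow).2.2.2 then '0' else '1'))
          ↔ ¬ (pvBase.getD ((p + i) % 12) ' ' = pvCh (pvFl fs i))) := by
      intro i h2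
      have hKc : ((pvBase ++ pvBase).length : Int) = 24 := by decide
      rw [hKc, hidxp]
      have hmod : PySem.Int.mod ((p : Int) + (i : Int)) 24 = (((p + i) % 24 : Nat) : Int) := by
        rw [PySem.Int.mod_eq_emod_of_pos (by norm_num)]
        push_cast
        omega
      rw [hmod, PySem.List.pyGetD_natCast, pvKbd _ (Nat.mod_lt _ (by norm_num)),
        Nat.mod_mod_of_dvd _ (by norm_num), PySem.List.pyGetD_natCast]
      have hch : (if (fs.getD i pvRow).2.2.2 then '0' else '1') = pvCh (pvFl fs i) := rfl
      rw [hch]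
    rw [pvFoldStop]
    simp only [Bool.true_and, decide_eq_true_eq]
    constructor
    · intro hV
      refine ⟨p % 12, Nat.mod_lt _ (by norm_num), ?_⟩
      intro i hi
      rw [Nat.mod_add_mod]
      by_cases hi12 : i < 12
      · exact hpre12 i hi12
      · have hv := hV (i : Int) (by rw [PySem.List.mem_pyRange_one]; omega)
        rw [hcond i hi] at hv
        exact not_not.mp hv
    · rintro ⟨r, hr, hP⟩
      intro x hx
      rw [PySem.List.mem_pyRange_one] at hx
      have hxi : x = ((x.toNat : Nat) : Int) := by omega
      have hilt : x.toNat < fs.length := by omega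
      rw [hxi, hcond x.toNat hilt, not_not]
      have hpr : p % 12 = r := by
        refine pvCore (p % 12) (Nat.mod_lt _ (by norm_num)) r hr ?_
        intro j hj
        rw [Nat.mod_add_mod, hpre12 j hj, hP j (by omega)]
      rw [← Nat.mod_add_mod, hpr]
      exact hP x.toNat hilt

theorem pvAllCond (fs : List (Int × Int × Int × Bool)) :
    (fs.all (fun r => !r.2.2.2)) = (!((fs.map (fun r => r.2.2.2)).any (fun b => b))) := by
  induction fs with
  | nil => rfl
  | cons x t ih => simp [ih, List.all_cons, List.any_cons]

theorem pvMain (fs : List (Int × Int × Int × Bool)) (hpre : Pre_has_pattern fs) :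
    has_pattern fs = has_pattern_alt fs := by
  unfold has_pattern has_pattern_alt
  by_cases h12 : fs.length < 12
  · simp [h12]
  · rw [if_neg h12, if_neg h12]
    have hn : 12 ≤ fs.length := Nat.not_lt.mp h12
    by_cases hall : fs.all (fun r => !r.2.2.2) = true
    · rw [if_pos hall, if_pos (by rw [← pvAllCond]; exact hall)]
      refine pvUniform_eq fs hn ?_
      exact hpre ⟨hn, fun r hr => by simpa using (List.all_eq_true.mp hall) r hr⟩
    · have hallA : (fs.all fun r => !r.2.2.2) = false := Bool.eq_false_iff.mpr hall
      have hallB : (!((fs.map (fun r => r.2.2.2)).any (fun b => b))) = false := by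
        rw [← pvAllCond]; exact hallA
      simp only [pvPattern_eq, hallA, hallB, Bool.false_eq_true, if_false]
      rw [Bool.eq_iff_iff, pvA3_iff fs hn, pvB3_iff fs]

-- ===== VERDICT (by name: the statement is the Claim_ definition above) =====
theorem has_pattern_spec : Claim_equal_has_pattern := by
  intro fs _ hpre
  exact pvMain fs hpre
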